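-- pv_equiv track=rewrite | github.com/itachi-eye/codenote | JZOffer/big_num.py | multiply_one
-- ===== SOURCE A (Python) =====
-- def multiply_one(nums: list, n, st, rst: list):
--     carry = 0
--     i = 0
--     for i in range(len(nums)):
--         a = nums[i] * n + carry
--         carry = a // 10
--         rst[i + st] += a % 10
--         if rst[i + st] >= 10:
--             rst[i + st] -= 10
--             rst[i + st + 1] += 1
--     if carry > 0:
--         rst[i + st + 1] += carry
--     return rst
-- ===== SOURCE B (Python) =====
-- def multiply_one(nums: list, n, st, rst: list):
--     # Two passes: first compute the product digits and final carry, then add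
--     # them into rst (mutates rst in place, like the original).
--     digits = []
--     carry = 0
--     for d in nums:
--         a = d * n + carry
--         digits.append(a % 10)
--         carry = a // 10
--     for j, dgt in enumerate(digits):
--         rst[j + st] += dgt
--         if rst[j + st] >= 10:
--             rst[j + st] -= 10
--             rst[j + st + 1] += 1
--     if carry > 0:
--         rst[len(digits) + st] += carry
--     return rst
-- ===== Notes on version B (the rewrite author's own statement) =====
-- stated objective: alternative
-- what changed: A's single interleaved loop (multiply, carry, add into rst, fix overflow per step) is split into two differently-shaped passes: one fold over nums producing the product-digit list and final carry, then a pass over enumerate(digits) adding into rst with the same single-step overflow fix, with the trailing carry added once at the end.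
-- outside the precondition, e.g. on multiply_one([1], 1, 0, [0]): A returns [1], B returns [1]
import Mathlib
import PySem

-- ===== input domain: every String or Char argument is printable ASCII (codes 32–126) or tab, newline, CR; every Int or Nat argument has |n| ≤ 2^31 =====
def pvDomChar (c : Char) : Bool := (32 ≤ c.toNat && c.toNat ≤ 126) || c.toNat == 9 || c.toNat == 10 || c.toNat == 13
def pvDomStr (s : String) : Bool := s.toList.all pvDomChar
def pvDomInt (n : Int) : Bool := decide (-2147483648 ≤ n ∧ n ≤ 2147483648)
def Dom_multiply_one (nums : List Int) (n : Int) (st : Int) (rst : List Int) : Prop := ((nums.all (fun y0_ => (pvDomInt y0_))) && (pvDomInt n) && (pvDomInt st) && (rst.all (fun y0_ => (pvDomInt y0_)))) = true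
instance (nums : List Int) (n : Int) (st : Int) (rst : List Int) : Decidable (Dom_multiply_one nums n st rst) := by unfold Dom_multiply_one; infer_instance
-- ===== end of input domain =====

-- B splits A's single interleaved multiply-and-add loop into two passes (product digits first,
-- then the add-with-single-step-overflow pass); like A it mutates rst in place in Python, and
-- the equivalence proved here is about the returned list.

-- shared helper: the in-place write 'rst[j+st] += dgt' followed by the single-step overflow fix,
-- exactly as both Python versions perform it
def pvWr (st : Int) (r : List Int) (j : Int) (dgt : Int) : List Int :=
  let r1 := PySem.List.pySetD r (j + st) (PySem.List.pyGetD r (j + st) 0 + dgt)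
  if PySem.List.pyGetD r1 (j + st) 0 ≥ 10 then
    let r2 := PySem.List.pySetD r1 (j + st) (PySem.List.pyGetD r1 (j + st) 0 - 10)
    PySem.List.pySetD r2 (j + st + 1) (PySem.List.pyGetD r2 (j + st + 1) 0 + 1)
  else r1

-- ===== PORT A =====
-- state is (carry, i, rst); i tracks Python's loop variable (0 if the loop never runs)
def multiply_one (nums : List Int) (n : Int) (st : Int) (rst : List Int) : List Int :=
  let s := (PySem.List.pyRange 0 (nums.length : Int) 1).foldl
    (fun (acc : Int × Int × List Int) i =>
      let a := PySem.List.pyGetD nums i 0 * n + acc.1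
      (PySem.Int.floordiv a 10, i, pvWr st acc.2.2 i (PySem.Int.mod a 10)))
    (0, 0, rst)
  if s.1 > 0 then
    PySem.List.pySetD s.2.2 (s.2.1 + st + 1) (PySem.List.pyGetD s.2.2 (s.2.1 + st + 1) 0 + s.1)
  else s.2.2

-- ===== PORT B =====
def multiply_one_alt (nums : List Int) (n : Int) (st : Int) (rst : List Int) : List Int :=
  let dc := nums.foldl
    (fun (acc : List Int × Int) d =>
      let a := d * n + acc.2
      (acc.1 ++ [PySem.Int.mod a 10], PySem.Int.floordiv a 10))
    ([], 0)
  let r := (PySem.List.enumerate dc.1 0).foldl (fun r p => pvWr st r p.1 p.2) rst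
  if dc.2 > 0 then
    PySem.List.pySetD r ((dc.1.length : Int) + st) (PySem.List.pyGetD r ((dc.1.length : Int) + st) 0 + dc.2)
  else r

-- ===== PRECONDITION & SPEC =====
-- Pre_ excludes inputs where some accessed index of rst can be out of range (Python IndexError):
-- it requires room for every digit position AND for the one-past-the-end carry cell, so it also
-- excludes some inputs on which A happens to return (no overflow at the last digit and no final
-- carry) — on those both programs return the same value, so nothing claimable is lost.
def Pre_multiply_one (nums : List Int) (n : Int) (st : Int) (rst : List Int) : Prop :=
  nums = [] ∨ (-(rst.length : Int) ≤ st ∧ st + (nums.length : Int) < (rst.length : Int))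
instance (nums : List Int) (n : Int) (st : Int) (rst : List Int) : Decidable (Pre_multiply_one nums n st rst) := by unfold Pre_multiply_one; infer_instance

def pvWitness_multiply_one : List Int × Int × Int × List Int := ([2, 3], 4, 0, [0, 1, 0, 0])

def Spec_multiply_one (nums : List Int) (n : Int) (st : Int) (rst : List Int) (out : List Int) : Prop := out = multiply_one_alt nums n st rst
instance (nums : List Int) (n : Int) (st : Int) (rst : List Int) (out : List Int) : Decidable (Spec_multiply_one nums n st rst out) := by unfold Spec_multiply_one; infer_instance

-- ===== CLAIM (what is proved, stated in full; the proofs are below) =====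
def Claim_equal_multiply_one : Prop := ∀ (nums : List Int) (n : Int) (st : Int) (rst : List Int), Dom_multiply_one nums n st rst → Pre_multiply_one nums n st rst → Spec_multiply_one nums n st rst (multiply_one nums n st rst)

-- ===== LEMMAS AND PROOFS =====

-- reference structural recursions used only by the proof
def pvCarry (n : Int) : List Int → Int → Int
  | [], c => c
  | d :: ds, c => pvCarry n ds (PySem.Int.floordiv (d * n + c) 10)

def pvDigits (n : Int) : List Int → Int → List Int
  | [], _ => []
  | d :: ds, c => PySem.Int.mod (d * n + c) 10 :: pvDigits n ds (PySem.Int.floordiv (d * n + c) 10)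

def pvApply (n st : Int) : List Int → Int → Int → List Int → List Int
  | [], _, _, r => r
  | d :: ds, c, j, r =>
      pvApply n st ds (PySem.Int.floordiv (d * n + c) 10) (j + 1) (pvWr st r j (PySem.Int.mod (d * n + c) 10))

theorem pvDigits_length (n : Int) (xs : List Int) (c : Int) : (pvDigits n xs c).length = xs.length := by
  induction xs generalizing c with
  | nil => rfl
  | cons d ds ih => simp [pvDigits, ih]

-- B's first pass computes (pvDigits, pvCarry)
theorem pvB_fold (n : Int) (xs : List Int) :
    ∀ (l0 : List Int) (c0 : Int),
      xs.foldl (fun (acc : List Int × Int) d =>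
          (acc.1 ++ [PySem.Int.mod (d * n + acc.2) 10], PySem.Int.floordiv (d * n + acc.2) 10)) (l0, c0)
        = (l0 ++ pvDigits n xs c0, pvCarry n xs c0) := by
  induction xs with
  | nil => simp [pvDigits, pvCarry]
  | cons d ds ih =>
      intro l0 c0
      rw [List.foldl_cons, ih]
      simp [pvDigits, pvCarry]

-- B's second pass over the precomputed digits equals the interleaved application
theorem pvB_apply (n st : Int) (xs : List Int) :
    ∀ (c j : Int) (r : List Int),
      (PySem.List.enumerate (pvDigits n xs c) j).foldl (fun r p => pvWr st r p.1 p.2) r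
        = pvApply n st xs c j r := by
  induction xs with
  | nil => intro c j r; simp [pvDigits, PySem.List.enumerate_nil, pvApply]
  | cons d ds ih =>
      intro c j r
      simp only [pvDigits, PySem.List.enumerate_cons, List.foldl, pvApply]
      exact ih _ _ _

-- A's loop, over an index suffix, equals the interleaved application (i-component tracked)
theorem pvA_fold (nums : List Int) (n st : Int) :
    ∀ (m k : Nat), k + m = nums.length →
    ∀ (c i0 : Int) (r : List Int),
      (PySem.List.pyRange (k : Int) (nums.length : Int) 1).foldl
        (fun (acc : Int × Int × List Int) i =>
          (PySem.Int.floordiv (PySem.List.pyGetD nums i 0 * n + acc.1) 10, i,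
           pvWr st acc.2.2 i (PySem.Int.mod (PySem.List.pyGetD nums i 0 * n + acc.1) 10)))
        (c, i0, r)
      = (pvCarry n (nums.drop k) c,
         (if m = 0 then i0 else (nums.length : Int) - 1),
         pvApply n st (nums.drop k) c (k : Int) r) := by
  intro m
  induction m with
  | zero =>
      intro k hk c i0 r
      have hk' : k = nums.length := by omega
      subst hk'
      rw [PySem.List.pyRange_one_eq_nil (by omega)]
      simp [List.drop_length, pvCarry, pvApply]
  | succ m ih =>
      intro k hk c i0 r
      have hklt : k < nums.length := by omega
      rw [PySem.List.pyRange_one_cons (by exact_mod_cast hklt)]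
      have hdrop : nums.drop k = nums[k] :: nums.drop (k + 1) := List.drop_eq_getElem_cons hklt
      have hget : PySem.List.pyGetD nums (k : Int) 0 = nums[k] := by
        rw [PySem.List.pyGetD_natCast]; exact List.getD_eq_getElem _ _ hklt
      simp only [List.foldl, hget]
      have : ((k : Int) + 1) = ((k + 1 : Nat) : Int) := by push_cast; ring
      rw [this, ih (k + 1) (by omega)]
      rw [hdrop]
      simp only [pvCarry, pvApply]
      have h2 : (if m = 0 then (k : Int) else (nums.length : Int) - 1) = (nums.length : Int) - 1 := by
        split_ifs with h0
        · omega
        · rfl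
      rw [h2, if_neg (by omega : ¬(m + 1 = 0)), this]

-- the two ports agree on every input (Pre_ is only needed for faithfulness to Python)
theorem pv_ports_eq (nums : List Int) (n st : Int) (rst : List Int) :
    multiply_one nums n st rst = multiply_one_alt nums n st rst := by
  unfold multiply_one multiply_one_alt
  rw [pvB_fold]
  simp only [List.nil_append]
  rw [pvB_apply]
  have hA := pvA_fold nums n st nums.length 0 (by omega) 0 0 rst
  rw [show ((0 : Nat) : Int) = 0 from rfl] at hA
  rw [hA]
  simp only [List.drop_zero]
  cases nums with
  | nil => simp [pvCarry, pvApply]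
  | cons d ds =>
      simp only [List.length_cons, pvDigits_length]
      have hne : ds.length + 1 ≠ 0 := by omega
      simp only [if_neg hne]
      split_ifs with h
      · have hidx : ((ds.length + 1 : Nat) : Int) - 1 + st + 1 = ((ds.length + 1 : Nat) : Int) + st := by push_cast; ring
        rw [hidx]
      · rfl

-- ===== VERDICT (by name: the statement is the Claim_ definition above) =====
theorem multiply_one_spec : Claim_equal_multiply_one := by
  intro nums n st rst _ _
  unfold Spec_multiply_one
  exact pv_ports_eq nums n st rst
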